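-- pv_equiv track=rewrite | github.com/Fedioun/annotation_tool | src/filtering.py | filter_long
-- ===== SOURCE A (Python) =====
-- def filter_long(tokens, n):
-- 	filtered = []
-- 	buffer = []
-- 	filter = False
-- 	c = 0
-- 	for token in tokens:
--
-- 		if token["text"] != "[n]":
-- 			c += len(token["text"])
-- 			if c > n:
-- 				break
-- 		else:
-- 			c = 0
-- 			filtered.extend(buffer)
-- 			buffer = []
-- 		buffer.append(token)
-- 	return filtered
-- ===== SOURCE B (Python) =====
-- def filter_long(tokens, n):
--     # Phase 1: split tokens into segments at "[n]" delimiter tokens.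
--     # Each segment records (its tokens, total text length of its content
--     # tokens, whether it has any content token). The trailing segment
--     # (after the last delimiter) is never emitted.
--     segments = []
--     cur, cur_len, has_content = [], 0, False
--     for token in tokens:
--         if token["text"] == "[n]":
--             segments.append((cur, cur_len, has_content))
--             cur, cur_len, has_content = [token], 0, False
--         else:
--             cur.append(token)
--             cur_len += len(token["text"])
--             has_content = True
--     # Phase 2: emit segments in order until one overflows.
--     result = []
--     for seg, length, has in segments:
--         if has and length > n:
--             break
--         result.extend(seg)
--     return result
-- ===== Notes on version B (the rewrite author's own statement) =====
-- stated objective: alternative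
-- what changed: Replaces A's single interleaved loop with buffer/counter/break state by a two-phase decomposition: first split the tokens into delimiter-started segments with precomputed content lengths, then emit whole segments in order until one overflows.
-- outside the precondition, e.g. on filter_long([{'text': 'a_x', 'a_x': 'z'}, {'a_x': '[n]'}], -1): A returns [], B raises KeyError
import Mathlib
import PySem

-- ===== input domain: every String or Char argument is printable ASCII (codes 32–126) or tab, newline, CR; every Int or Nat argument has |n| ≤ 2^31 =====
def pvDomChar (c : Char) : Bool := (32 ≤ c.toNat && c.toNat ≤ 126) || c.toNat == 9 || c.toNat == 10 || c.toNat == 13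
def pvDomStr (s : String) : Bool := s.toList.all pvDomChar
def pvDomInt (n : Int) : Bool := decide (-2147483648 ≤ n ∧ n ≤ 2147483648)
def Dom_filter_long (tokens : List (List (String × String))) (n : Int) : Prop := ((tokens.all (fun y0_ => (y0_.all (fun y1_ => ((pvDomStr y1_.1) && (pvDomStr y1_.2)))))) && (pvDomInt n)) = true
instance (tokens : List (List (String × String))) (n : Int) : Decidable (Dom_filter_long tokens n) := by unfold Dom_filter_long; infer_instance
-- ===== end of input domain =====

-- B replaces A's interleaved buffer/counter/break loop by a two-phase decomposition
-- (split into delimiter-started segments with precomputed content lengths, then emit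
-- whole segments until one overflows); objective: a structurally different algorithm of the same cost.

-- token["text"] (Python dict lookup = first match); none (KeyError) is excluded by Pre_,
-- the `getD ""` default is never reached on admitted inputs
def pvTextOf (t : List (String × String)) : String :=
  ((PySem.Dict.mk t).get? "text").getD ""

-- ===== PORT A =====
def filterLongLoopA (n : Int) : List (List (String × String)) → List (List (String × String)) → List (List (String × String)) → Int → List (List (String × String))
  | [], filtered, _, _ => filtered
  | t :: rest, filtered, buffer, c =>
    if pvTextOf t ≠ "[n]" then
      let c' := c + PySem.Str.len (pvTextOf t)
      if c' > n then filtered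
      else filterLongLoopA n rest filtered (buffer ++ [t]) c'
    else
      filterLongLoopA n rest (filtered ++ buffer) [t] 0

def filter_long (tokens : List (List (String × String))) (n : Int) : List (List (String × String)) :=
  filterLongLoopA n tokens [] [] 0

-- ===== PORT B =====
-- phase 1: segments as (tokens, content length, has a content token); the trailing segment is dropped
def filterLongSegs : List (List (String × String)) → (List (List (String × String)) × Int × Bool) → List (List (List (String × String)) × Int × Bool)
  | [], _ => []
  | t :: rest, (cur, curLen, hasContent) =>
    if pvTextOf t = "[n]" then
      (cur, curLen, hasContent) :: filterLongSegs rest ([t], 0, false)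
    else
      filterLongSegs rest (cur ++ [t], curLen + PySem.Str.len (pvTextOf t), true)

-- phase 2: emit segments in order until one overflows
def filterLongEmit (n : Int) : List (List (List (String × String)) × Int × Bool) → List (List (String × String))
  | [] => []
  | (seg, len, has) :: rest =>
    if has && decide (len > n) then [] else seg ++ filterLongEmit n rest

def filter_long_alt (tokens : List (List (String × String))) (n : Int) : List (List (String × String)) :=
  filterLongEmit n (filterLongSegs tokens ([], 0, false))

-- ===== PRECONDITION & SPEC =====
-- Pre_ excludes inputs with a token dict lacking a "text" key: A raises KeyError there unless its
-- break happens to fire first (then A returns early while B's full scan raises KeyError).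
def Pre_filter_long (tokens : List (List (String × String))) (_n : Int) : Prop :=
  ∀ t ∈ tokens, (((PySem.Dict.mk t).get? "text").isSome = true)
instance (tokens : List (List (String × String))) (n : Int) : Decidable (Pre_filter_long tokens n) := by unfold Pre_filter_long; infer_instance

def pvWitness_filter_long : (List (List (String × String))) × Int :=
  ([[("text", "ab")], [("text", "[n]")], [("text", "cde")]], 5)

def Spec_filter_long (tokens : List (List (String × String))) (n : Int) (out : List (List (String × String))) : Prop := out = filter_long_alt tokens n
instance (tokens : List (List (String × String))) (n : Int) (out : List (List (String × String))) : Decidable (Spec_filter_long tokens n out) := by unfold Spec_filter_long; infer_instance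

-- ===== CLAIM (what is proved, stated in full; the proofs are below) =====
def Claim_equal_filter_long : Prop := ∀ (tokens : List (List (String × String))) (n : Int), Dom_filter_long tokens n → Pre_filter_long tokens n → Spec_filter_long tokens n (filter_long tokens n)

-- ===== LEMMAS AND PROOFS =====

theorem pvStrLen_nonneg (s : String) : 0 ≤ PySem.Str.len s := by
  simp [PySem.Str.len_eq]

-- once the running content length exceeds n with a content token seen, nothing more is emitted
theorem filterLong_overflow (n : Int) (rest : List (List (String × String)))
    (cur : List (List (String × String))) (c : Int) (hc : n < c) :
    filterLongEmit n (filterLongSegs rest (cur, c, true)) = [] := by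
  induction rest generalizing cur c with
  | nil => simp [filterLongSegs, filterLongEmit]
  | cons t rest ih =>
    by_cases ht : pvTextOf t = "[n]"
    · simp [filterLongSegs, ht, filterLongEmit, hc]
    · have hlen := pvStrLen_nonneg (pvTextOf t)
      simp only [filterLongSegs, if_neg ht]
      exact ih _ _ (by omega)

-- loop invariant: A's loop equals "already flushed" ++ emission of the remaining segments
theorem filterLong_inv (n : Int) (rest : List (List (String × String)))
    (filtered cur : List (List (String × String))) (c : Int) (h : Bool)
    (hinv : h = true → c ≤ n) :
    filterLongLoopA n rest filtered cur c =
      filtered ++ filterLongEmit n (filterLongSegs rest (cur, c, h)) := by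
  induction rest generalizing filtered cur c h with
  | nil => simp [filterLongLoopA, filterLongSegs, filterLongEmit]
  | cons t rest ih =>
    simp only [filterLongLoopA, filterLongSegs]
    by_cases ht : pvTextOf t = "[n]"
    · rw [if_neg (not_not_intro ht), if_pos ht]
      have hcond : (h && decide (c > n)) = false := by
        cases h with
        | false => simp
        | true => simp only [Bool.true_and, decide_eq_false_iff_not, not_lt]; exact hinv rfl
      simp only [filterLongEmit, hcond, Bool.false_eq_true, if_false]
      rw [ih (filtered ++ cur) [t] 0 false (by simp)]
      rw [List.append_assoc]
    · rw [if_pos ht, if_neg ht]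
      by_cases hb : c + PySem.Str.len (pvTextOf t) > n
      · rw [if_pos hb, filterLong_overflow n rest (cur ++ [t]) (c + PySem.Str.len (pvTextOf t)) hb]
        simp
      · rw [if_neg hb]
        exact ih filtered (cur ++ [t]) (c + PySem.Str.len (pvTextOf t)) true (fun _ => by omega)

-- ===== VERDICT (by name: the statement is the Claim_ definition above) =====
theorem filter_long_spec : Claim_equal_filter_long := by
  intro tokens n _ _
  show filter_long tokens n = filter_long_alt tokens n
  unfold filter_long filter_long_alt
  rw [filterLong_inv n tokens [] [] 0 false (by simp)]
  simp
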